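-- pv_equiv track=rewrite | github.com/BUAA-SIC-LAB/D2SC | util/pos_embed.py | _infer_extra_tokens
-- ===== SOURCE A (Python) =====
-- import math
--
-- def _infer_extra_tokens(total_tokens, max_try=3):
--     """
--     Automatically infer the number of extra tokens in the checkpoint, and assume that the number of extra tokens is no more than 3.
--     Return the number of extra tokens in the checkpoint model, extra_tokens_ckpt, and the number of patch grids in the checkpoint model.
--     """
--     # 通常 cls / dist / others 不会超过 3 个
--     for extra in range(max_try + 1):
--         # 逐个猜测额外token的数量，直到猜中
--         num_patch = total_tokens - extra
--         g = int(math.isqrt(num_patch))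
--         if g * g == num_patch:
--             return extra, g
--     raise RuntimeError("The number of tokens in the checkpoint model does not match the number in the original model, "
--                        "so positional embedding interpolation cannot be performed.")
-- ===== SOURCE B (Python) =====
-- import math
--
-- def _infer_extra_tokens(total_tokens, max_try=3):
--     # Closed form: the smallest extra with total_tokens - extra a perfect square
--     # is total_tokens - isqrt(total_tokens)**2.
--     g = math.isqrt(total_tokens)
--     extra = total_tokens - g * g
--     if extra <= max_try:
--         return extra, g
--     raise RuntimeError("The number of tokens in the checkpoint model does not match the number in the original model, "
--                        "so positional embedding interpolation cannot be performed.")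
-- ===== Notes on version B (the rewrite author's own statement) =====
-- stated objective: simpler
-- what changed: Replaces the trial loop over extra in range(max_try+1) with a closed form: g = isqrt(total_tokens), extra = total_tokens - g*g, returning (extra, g) iff extra <= max_try.
import Mathlib
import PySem

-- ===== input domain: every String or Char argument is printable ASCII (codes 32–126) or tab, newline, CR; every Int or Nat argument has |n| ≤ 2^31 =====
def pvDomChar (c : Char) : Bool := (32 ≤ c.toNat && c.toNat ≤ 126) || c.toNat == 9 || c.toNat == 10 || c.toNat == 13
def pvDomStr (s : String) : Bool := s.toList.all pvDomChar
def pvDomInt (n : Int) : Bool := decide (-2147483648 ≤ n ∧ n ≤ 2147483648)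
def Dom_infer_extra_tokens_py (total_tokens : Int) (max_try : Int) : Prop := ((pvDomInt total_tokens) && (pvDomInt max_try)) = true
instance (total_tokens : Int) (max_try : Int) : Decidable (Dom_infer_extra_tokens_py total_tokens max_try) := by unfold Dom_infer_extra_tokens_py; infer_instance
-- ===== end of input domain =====

-- B replaces A's trial loop over extra in range(max_try+1) with the closed form
-- extra = total_tokens - isqrt(total_tokens)^2 (simpler; same return value wherever A returns).

-- ===== PORT A =====
-- kernel-transparent int(math.isqrt n): fuel-based halving recursion (fuel ≥ n suffices);
-- proved equal to Nat.sqrt below (pyIsqrt_eq_sqrt)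
def isqrtFuel : Nat → Nat → Nat
  | 0, _ => 0
  | f + 1, n =>
    if n ≤ 1 then n
    else
      let r := 2 * isqrtFuel f (n / 4)
      if (r + 1) * (r + 1) ≤ n then r + 1 else r

def pyIsqrt (n : Nat) : Nat := isqrtFuel n n

-- Python raises (RuntimeError when the loop exhausts; ValueError from isqrt on a negative
-- argument); those inputs are excluded by Pre_; the port returns (-1,-1) there.
def inferLoopA (total_tokens : Int) : List Int → Int × Int
  | [] => (-1, -1)          -- 'raise RuntimeError(...)', excluded by Pre_
  | extra :: rest =>
    let num_patch := total_tokens - extra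
    -- int(math.isqrt(num_patch)); Python raises on num_patch < 0 (excluded by Pre_)
    let g : Int := (pyIsqrt num_patch.toNat : Int)
    if g * g = num_patch then (extra, g) else inferLoopA total_tokens rest

def infer_extra_tokens_py (total_tokens : Int) (max_try : Int) : Int × Int :=
  inferLoopA total_tokens (PySem.List.pyRange 0 (max_try + 1) 1)

-- ===== PORT B =====
def infer_extra_tokens_py_alt (total_tokens : Int) (max_try : Int) : Int × Int :=
  -- math.isqrt(total_tokens); Python raises on total_tokens < 0 (excluded by Pre_)
  let g : Int := (pyIsqrt total_tokens.toNat : Int)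
  let extra := total_tokens - g * g
  if extra ≤ max_try then (extra, g) else (-1, -1)   -- 'raise RuntimeError(...)', excluded by Pre_

-- ===== PRECONDITION & SPEC =====
-- Pre_ excludes exactly the inputs where A raises: total_tokens < 0 (ValueError from isqrt,
-- or RuntimeError when the range is empty) and inputs where no extra in 0..max_try makes
-- total_tokens - extra a perfect square (RuntimeError). In closed form the condition is
-- 0 ≤ total_tokens ∧ total_tokens - ⌊√total_tokens⌋² ≤ max_try; pyIsqrt is only the
-- kernel-computable spelling of ⌊√·⌋ (pyIsqrt_eq_sqrt below proves pyIsqrt = Nat.sqrt) —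
-- it is not a re-run of either port's algorithm (A loops over `extra`, not a sqrt iteration).
def Pre_infer_extra_tokens_py (total_tokens : Int) (max_try : Int) : Prop :=
  0 ≤ total_tokens ∧ total_tokens - (pyIsqrt total_tokens.toNat : Int) ^ 2 ≤ max_try
instance (total_tokens : Int) (max_try : Int) : Decidable (Pre_infer_extra_tokens_py total_tokens max_try) := by unfold Pre_infer_extra_tokens_py; infer_instance
def pvWitness_infer_extra_tokens_py : Int × Int := (10, 3)

def Spec_infer_extra_tokens_py (total_tokens : Int) (max_try : Int) (out : Int × Int) : Prop := out = infer_extra_tokens_py_alt total_tokens max_try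
instance (total_tokens : Int) (max_try : Int) (out : Int × Int) : Decidable (Spec_infer_extra_tokens_py total_tokens max_try out) := by unfold Spec_infer_extra_tokens_py; infer_instance

-- ===== CLAIM (what is proved, stated in full; the proofs are below) =====
def Claim_equal_infer_extra_tokens_py : Prop := ∀ (total_tokens : Int) (max_try : Int), Dom_infer_extra_tokens_py total_tokens max_try → Pre_infer_extra_tokens_py total_tokens max_try → Spec_infer_extra_tokens_py total_tokens max_try (infer_extra_tokens_py total_tokens max_try)

-- ===== LEMMAS AND PROOFS =====

lemma isqrtFuel_eq_sqrt : ∀ (f n : Nat), n ≤ f → isqrtFuel f n = Nat.sqrt n := by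
  intro f
  induction f with
  | zero =>
    intro n hn
    interval_cases n
    rfl
  | succ f ih =>
    intro n hn
    unfold isqrtFuel
    by_cases h1 : n ≤ 1
    · rw [if_pos h1]
      interval_cases n <;> simp
    · rw [if_neg h1]
      have hq : n / 4 ≤ f := by omega
      rw [ih (n / 4) hq]
      set s := Nat.sqrt (n / 4) with hsdef
      have hsl : s ^ 2 ≤ n / 4 := Nat.sqrt_le' (n / 4)
      have hsu : n / 4 < (s + 1) ^ 2 := Nat.lt_succ_sqrt' (n / 4)
      have hlow : (2 * s) * (2 * s) ≤ n := by
        have := Nat.div_mul_le_self n 4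
        nlinarith [hsl]
      have hup : n < (2 * s + 2) ^ 2 := by
        have h4 : n ≤ 4 * (n / 4) + 3 := by omega
        nlinarith [hsu]
      by_cases hc : (2 * s + 1) * (2 * s + 1) ≤ n
      · rw [if_pos hc]
        have hle : 2 * s + 1 ≤ Nat.sqrt n := Nat.le_sqrt'.mpr (by rw [pow_two]; exact hc)
        have hlt : Nat.sqrt n < 2 * s + 2 := Nat.sqrt_lt'.mpr hup
        omega
      · rw [if_neg hc]
        have hle : 2 * s ≤ Nat.sqrt n := Nat.le_sqrt'.mpr (by rw [pow_two]; exact hlow)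
        have hlt : Nat.sqrt n < 2 * s + 1 := Nat.sqrt_lt'.mpr (by rw [pow_two]; omega)
        omega

lemma pyIsqrt_eq_sqrt (n : Nat) : pyIsqrt n = Nat.sqrt n :=
  isqrtFuel_eq_sqrt n n le_rfl


-- the key loop invariant: scanning extras a, a+1, ... the loop returns at extra* = t - s^2
lemma inferLoopA_range (t : Int) (ht : 0 ≤ t)
    (s : Int) (hs : s = (Nat.sqrt t.toNat : Int)) :
    ∀ (k : Nat) (a b : Int), (b - a).toNat = k → 0 ≤ a → a ≤ t - s * s → t - s * s < b →
      inferLoopA t (PySem.List.pyRange a b 1) = (t - s * s, s) := by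
  have hs0 : 0 ≤ s := by rw [hs]; exact Int.natCast_nonneg _
  have hlow : s * s ≤ t := by
    have h := Nat.sqrt_le' t.toNat
    have h2 : ((Nat.sqrt t.toNat ^ 2 : Nat) : Int) ≤ (t.toNat : Int) := Int.ofNat_le.mpr h
    rw [pow_two, Int.toNat_of_nonneg ht] at h2
    rw [hs]; exact_mod_cast h2
  intro k
  induction k with
  | zero =>
    intro a b hk h0 hle hlt
    omega
  | succ n ih =>
    intro a b hk h0 hle hlt
    have hab : a < b := by omega
    rw [PySem.List.pyRange_one_cons hab]
    unfold inferLoopA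
    simp only [pyIsqrt_eq_sqrt]
    -- for a strictly below t - s*s, t - a lies strictly between s*s and (s+1)*(s+1): not a square
    have hnotsq : a < t - s * s →
        ((Nat.sqrt (t - a).toNat : Nat) : Int) * ((Nat.sqrt (t - a).toNat : Nat) : Int) ≠ t - a := by
      intro halt heq
      have hss : 0 ≤ s * s := mul_nonneg hs0 hs0
      set q := (t - a).toNat with hq
      have hncast : (q : Int) = t - a := Int.toNat_of_nonneg (by omega)
      have hsq : Nat.sqrt q * Nat.sqrt q = q := by exact_mod_cast heq.trans hncast.symm
      have hmono : Nat.sqrt q ≤ Nat.sqrt t.toNat := by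
        apply Nat.sqrt_le_sqrt
        omega
      have hgtN : Nat.sqrt t.toNat * Nat.sqrt t.toNat < q := by
        have h1 : s * s < (q : Int) := by omega
        rw [hs] at h1
        exact_mod_cast h1
      nlinarith [hsq, hmono, hgtN]
    -- at a = t - s*s, the square root of t - a is exactly s
    have hgs : a = t - s * s → ((Nat.sqrt (t - a).toNat : Nat) : Int) = s := by
      intro ha
      have hnp : t - a = s * s := by omega
      rw [hnp, hs]
      have : ((Nat.sqrt t.toNat : Int) * (Nat.sqrt t.toNat : Int)).toNat
          = Nat.sqrt t.toNat * Nat.sqrt t.toNat := by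
        exact_mod_cast Int.toNat_natCast (Nat.sqrt t.toNat * Nat.sqrt t.toNat)
      rw [this, ← pow_two, Nat.sqrt_eq']
    split_ifs with hif
    · have ha : a = t - s * s := by
        by_contra hc
        exact hnotsq (lt_of_le_of_ne hle hc) hif
      rw [hgs ha, ha]
    · have ha : a ≠ t - s * s := by
        intro hc
        exact hif (by rw [hgs hc]; omega)
      exact ih (a + 1) b (by omega) (by omega) (by omega) hlt

theorem infer_extra_tokens_py_spec : Claim_equal_infer_extra_tokens_py := by
  intro t m hdom hpre
  obtain ⟨ht, hle⟩ := hpre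
  rw [pyIsqrt_eq_sqrt] at hle
  unfold Spec_infer_extra_tokens_py infer_extra_tokens_py infer_extra_tokens_py_alt
  simp only [pyIsqrt_eq_sqrt]
  have hs2 : (Nat.sqrt t.toNat : Int) ^ 2 = (Nat.sqrt t.toNat : Int) * (Nat.sqrt t.toNat : Int) := sq _
  rw [hs2] at hle
  have hlow : (Nat.sqrt t.toNat : Int) * (Nat.sqrt t.toNat : Int) ≤ t := by
    have h := Nat.sqrt_le' t.toNat
    have h2 : ((Nat.sqrt t.toNat ^ 2 : Nat) : Int) ≤ (t.toNat : Int) := Int.ofNat_le.mpr h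
    rw [pow_two, Int.toNat_of_nonneg ht] at h2
    exact h2
  rw [inferLoopA_range t ht _ rfl ((m + 1) - 0).toNat 0 (m + 1) rfl le_rfl (by omega) (by omega)]
  simp [hle]
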